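-- pv_equiv track=rewrite | github.com/Nireus79/Seagull2 | causation_agentic_research_3.py | _get_timeframe_combinations
-- ===== SOURCE A (Python) =====
-- from typing import Dict, List, Tuple, Optional, Union, Any, Set
--
-- def _get_timeframe_combinations(features: List[str]) -> List[List[str]]:
--     """Create combinations across different timeframes"""
--     combinations = []
--
--     # Multi-timeframe volume
--     volume_timeframes = [f for f in features if 'volume' in f.lower()]
--     if len(volume_timeframes) >= 2:
--         combinations.append(volume_timeframes[:2])
--
--     # Multi-timeframe price features
--     timeframe_indicators = ['1h', '4h', '1d', '1w']
--     for indicator in timeframe_indicators: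
--         timeframe_features = [f for f in features if indicator.lower() in f.lower()]
--         if len(timeframe_features) >= 2:
--             combinations.append(timeframe_features[:2])
--
--     return combinations
-- ===== SOURCE B (Python) =====
-- def _get_timeframe_combinations(features):
--     """Create combinations across different timeframes (single pass over features)."""
--     keys = ['volume', '1h', '4h', '1d', '1w']
--     buckets = {k: [] for k in keys}
--     for f in features:
--         fl = f.lower()
--         for k in keys:
--             if k in fl:
--                 buckets[k].append(f)
--     return [buckets[k][:2] for k in keys if len(buckets[k]) >= 2]
-- ===== Notes on version B (the rewrite author's own statement) =====
-- stated objective: faster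
-- what changed: B makes one pass over features, lowering each feature once and appending it to every matching bucket of a dict keyed by the five substrings, then emits the size>=2 buckets truncated to two in fixed key order, instead of A's five independent filter passes each re-lowering every feature.
import Mathlib
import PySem

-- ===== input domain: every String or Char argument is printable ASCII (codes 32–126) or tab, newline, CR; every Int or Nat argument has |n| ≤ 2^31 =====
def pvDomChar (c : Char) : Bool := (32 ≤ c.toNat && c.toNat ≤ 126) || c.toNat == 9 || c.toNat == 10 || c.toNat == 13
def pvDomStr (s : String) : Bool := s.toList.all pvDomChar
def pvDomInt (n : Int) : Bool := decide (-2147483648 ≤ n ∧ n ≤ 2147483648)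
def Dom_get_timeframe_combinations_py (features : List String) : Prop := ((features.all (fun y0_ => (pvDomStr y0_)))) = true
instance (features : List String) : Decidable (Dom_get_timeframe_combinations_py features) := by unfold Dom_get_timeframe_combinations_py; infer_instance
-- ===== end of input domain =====

-- B replaces A's five independent filter passes (each re-lowering every feature) by one pass
-- over the features that lowers each feature once and appends it to every matching bucket;
-- objective: alternative decomposition (single pass, dict-of-lists).

-- ===== PORT A =====
-- 'volume' in f.lower()  /  indicator.lower() in f.lower()
def get_timeframe_combinations_py (features : List String) : List (List String) :=
  let volume_timeframes := features.filter (fun f => PySem.Str.isIn "volume" (PySem.Str.lower f))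
  let combinations : List (List String) :=
    if volume_timeframes.length ≥ 2 then [volume_timeframes.take 2] else []
  (["1h", "4h", "1d", "1w"]).foldl
    (fun combs indicator =>
      let timeframe_features :=
        features.filter (fun f => PySem.Str.isIn (PySem.Str.lower indicator) (PySem.Str.lower f))
      if timeframe_features.length ≥ 2 then combs ++ [timeframe_features.take 2] else combs)
    combinations

-- ===== PORT B =====
-- one step of B's feature loop: lower the feature once, append it to every matching bucket
def pvBStep (acc : List String × List String × List String × List String × List String)
    (f : String) : List String × List String × List String × List String × List String :=
  let fl := PySem.Str.lower f
  ⟨if PySem.Str.isIn "volume" fl then acc.1 ++ [f] else acc.1,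
   if PySem.Str.isIn "1h" fl then acc.2.1 ++ [f] else acc.2.1,
   if PySem.Str.isIn "4h" fl then acc.2.2.1 ++ [f] else acc.2.2.1,
   if PySem.Str.isIn "1d" fl then acc.2.2.2.1 ++ [f] else acc.2.2.2.1,
   if PySem.Str.isIn "1w" fl then acc.2.2.2.2 ++ [f] else acc.2.2.2.2⟩

def get_timeframe_combinations_py_alt (features : List String) : List (List String) :=
  let buckets := features.foldl pvBStep ⟨[], [], [], [], []⟩
  ([buckets.1, buckets.2.1, buckets.2.2.1, buckets.2.2.2.1, buckets.2.2.2.2]).foldl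
    (fun out b => if b.length ≥ 2 then out ++ [b.take 2] else out) []

-- ===== PRECONDITION & SPEC =====
def Spec_get_timeframe_combinations_py (features : List String) (out : List (List String)) : Prop := out = get_timeframe_combinations_py_alt features
instance (features : List String) (out : List (List String)) : Decidable (Spec_get_timeframe_combinations_py features out) := by unfold Spec_get_timeframe_combinations_py; infer_instance

-- ===== CLAIM (what is proved, stated in full; the proofs are below) =====
def Claim_equal_get_timeframe_combinations_py : Prop := ∀ (features : List String), Dom_get_timeframe_combinations_py features → Spec_get_timeframe_combinations_py features (get_timeframe_combinations_py features)

-- ===== LEMMAS AND PROOFS =====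

-- each bucket of B's one-pass fold is exactly the corresponding filter of A
theorem pvBStep_fst (features : List String) (acc : List String × List String × List String × List String × List String) :
    (features.foldl pvBStep acc).1
      = acc.1 ++ features.filter (fun f => PySem.Str.isIn "volume" (PySem.Str.lower f)) := by
  induction features generalizing acc with
  | nil => simp
  | cons f fs ih =>
    simp only [List.foldl_cons, List.filter_cons, ih, pvBStep]
    split <;> simp

theorem pvBStep_h1 (features : List String) (acc : List String × List String × List String × List String × List String) :
    (features.foldl pvBStep acc).2.1
      = acc.2.1 ++ features.filter (fun f => PySem.Str.isIn "1h" (PySem.Str.lower f)) := by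
  induction features generalizing acc with
  | nil => simp
  | cons f fs ih =>
    simp only [List.foldl_cons, List.filter_cons, ih, pvBStep]
    split <;> simp

theorem pvBStep_h4 (features : List String) (acc : List String × List String × List String × List String × List String) :
    (features.foldl pvBStep acc).2.2.1
      = acc.2.2.1 ++ features.filter (fun f => PySem.Str.isIn "4h" (PySem.Str.lower f)) := by
  induction features generalizing acc with
  | nil => simp
  | cons f fs ih =>
    simp only [List.foldl_cons, List.filter_cons, ih, pvBStep]
    split <;> simp

theorem pvBStep_d1 (features : List String) (acc : List String × List String × List String × List String × List String) :
    (features.foldl pvBStep acc).2.2.2.1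
      = acc.2.2.2.1 ++ features.filter (fun f => PySem.Str.isIn "1d" (PySem.Str.lower f)) := by
  induction features generalizing acc with
  | nil => simp
  | cons f fs ih =>
    simp only [List.foldl_cons, List.filter_cons, ih, pvBStep]
    split <;> simp

theorem pvBStep_w1 (features : List String) (acc : List String × List String × List String × List String × List String) :
    (features.foldl pvBStep acc).2.2.2.2
      = acc.2.2.2.2 ++ features.filter (fun f => PySem.Str.isIn "1w" (PySem.Str.lower f)) := by
  induction features generalizing acc with
  | nil => simp
  | cons f fs ih =>
    simp only [List.foldl_cons, List.filter_cons, ih, pvBStep]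
    split <;> simp

-- the indicator literals are already lowercase
theorem pvLower_1h : PySem.Str.lower "1h" = "1h" := by decide
theorem pvLower_4h : PySem.Str.lower "4h" = "4h" := by decide
theorem pvLower_1d : PySem.Str.lower "1d" = "1d" := by decide
theorem pvLower_1w : PySem.Str.lower "1w" = "1w" := by decide

-- ===== VERDICT (by name: the statement is the Claim_ definition above) =====
theorem get_timeframe_combinations_py_spec : Claim_equal_get_timeframe_combinations_py := by
  intro features _
  show get_timeframe_combinations_py features = get_timeframe_combinations_py_alt features
  simp only [get_timeframe_combinations_py, get_timeframe_combinations_py_alt,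
    List.foldl_cons, List.foldl_nil,
    pvBStep_fst, pvBStep_h1, pvBStep_h4, pvBStep_d1, pvBStep_w1,
    pvLower_1h, pvLower_4h, pvLower_1d, pvLower_1w, List.nil_append]
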